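-- pv_equiv track=rewrite | github.com/mezcalfighter/BackendDjango | PracticeAlgorithms/diff_num.py | check_diff
-- ===== SOURCE A (Python) =====
-- def check_diff(list1, list2):
--     hash = set()
--     for item in list1:
--         hash.add(item)
--     for item in list2:
--         if item in hash:
--             return True
--     return False
-- ===== SOURCE B (Python) =====
-- def check_diff(list1, list2):
--     a = sorted(list1)
--     b = sorted(list2)
--     i = j = 0
--     while i < len(a) and j < len(b):
--         if a[i] == b[j]:
--             return True
--         if a[i] < b[j]:
--             i += 1
--         else:
--             j += 1
--     return False
-- ===== Notes on version B (the rewrite author's own statement) =====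
-- stated objective: alternative
-- what changed: Replaces A's hash-set build plus membership scan with a sort-both-lists then two-pointer merge scan for a common element.
import Mathlib
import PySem

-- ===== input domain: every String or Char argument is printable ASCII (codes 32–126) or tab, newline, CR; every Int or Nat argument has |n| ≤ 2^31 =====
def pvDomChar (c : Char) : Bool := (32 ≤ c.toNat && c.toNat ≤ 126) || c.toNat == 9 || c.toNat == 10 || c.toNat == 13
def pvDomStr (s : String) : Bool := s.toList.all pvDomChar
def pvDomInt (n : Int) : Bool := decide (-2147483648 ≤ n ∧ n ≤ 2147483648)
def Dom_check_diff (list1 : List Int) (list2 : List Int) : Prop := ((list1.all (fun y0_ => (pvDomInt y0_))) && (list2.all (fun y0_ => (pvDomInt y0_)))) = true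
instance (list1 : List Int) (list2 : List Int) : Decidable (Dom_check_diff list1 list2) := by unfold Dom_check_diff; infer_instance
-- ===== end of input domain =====

-- B replaces A's hash-set build plus membership scan by sorting both lists and running a two-pointer merge scan (alternative algorithm, same result).


-- ===== PORT A =====
-- second loop of A: scan list2, early-return True on a member of hash
def checkDiffLoop (hash : PySem.Set Int) : List Int → Bool
  | [] => false
  | item :: rest => if PySem.Set.contains hash item then true else checkDiffLoop hash rest

def check_diff (list1 : List Int) (list2 : List Int) : Bool :=
  let hash := list1.foldl PySem.Set.add PySem.Set.empty
  checkDiffLoop hash list2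

-- ===== PORT B =====
-- the while loop of B: two-pointer merge scan over the two sorted lists
def twoPointer : List Int → List Int → Bool
  | [], _ => false
  | _ :: _, [] => false
  | x :: xs, y :: ys =>
      if x = y then true
      else if x < y then twoPointer xs (y :: ys)
      else twoPointer (x :: xs) ys

def check_diff_alt (list1 : List Int) (list2 : List Int) : Bool :=
  twoPointer (PySem.List.sorted list1 (fun z => z) false)
             (PySem.List.sorted list2 (fun z => z) false)

-- ===== PRECONDITION & SPEC =====
def Spec_check_diff (list1 : List Int) (list2 : List Int) (out : Bool) : Prop := out = check_diff_alt list1 list2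
instance (list1 : List Int) (list2 : List Int) (out : Bool) : Decidable (Spec_check_diff list1 list2 out) := by unfold Spec_check_diff; infer_instance

-- ===== CLAIM (what is proved, stated in full; the proofs are below) =====
def Claim_equal_check_diff : Prop := ∀ (list1 : List Int) (list2 : List Int), Dom_check_diff list1 list2 → Spec_check_diff list1 list2 (check_diff list1 list2)

-- ===== LEMMAS AND PROOFS =====
-- A's result is exactly "some element of list2 lies in list1"
theorem checkDiffLoop_eq (hash : PySem.Set Int) (l : List Int) :
    checkDiffLoop hash l = l.any (fun x => PySem.Set.contains hash x) := by
  induction l with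
  | nil => rfl
  | cons x rest ih => by_cases h : PySem.Set.contains hash x <;> simp [checkDiffLoop, ih]


theorem check_diff_eq_any (list1 list2 : List Int) :
    check_diff list1 list2 = list2.any (fun x => decide (x ∈ list1)) := by
  unfold check_diff
  rw [checkDiffLoop_eq,
      show List.foldl PySem.Set.add PySem.Set.empty list1 = PySem.Set.ofList list1 from
        (PySem.Set.ofList_eq_foldl list1).symm]
  congr 1
  funext x
  rw [Bool.eq_iff_iff]
  simp [PySem.Set.mem_ofList]

-- B's two-pointer scan on sorted lists decides existence of a common element
theorem twoPointer_iff (a b : List Int)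
    (ha : a.Pairwise (· ≤ ·)) (hb : b.Pairwise (· ≤ ·)) :
    twoPointer a b = true ↔ ∃ z, z ∈ a ∧ z ∈ b := by
  induction a, b using twoPointer.induct with
  | case1 b => simp [twoPointer]
  | case2 x xs => simp [twoPointer]
  | case3 xs y ys =>
      simp only [twoPointer, if_pos trivial, true_iff]
      exact ⟨y, List.mem_cons_self .., List.mem_cons_self ..⟩
  | case4 x xs y ys hne hlt ih =>
      rcases List.pairwise_cons.mp ha with ⟨hx, ha'⟩
      rcases List.pairwise_cons.mp hb with ⟨hy, hb'⟩
      rw [twoPointer, if_neg hne, if_pos hlt, ih ha' hb]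
      constructor
      · rintro ⟨z, hz1, hz2⟩; exact ⟨z, List.mem_cons_of_mem _ hz1, hz2⟩
      · rintro ⟨z, hz1, hz2⟩
        rcases List.mem_cons.mp hz1 with rfl | hz1'
        · exfalso
          rcases List.mem_cons.mp hz2 with rfl | hz2'
          · exact hne rfl
          · exact absurd (hy z hz2') (not_le.mpr hlt)
        · exact ⟨z, hz1', hz2⟩
  | case5 x xs y ys hne hnlt ih =>
      rcases List.pairwise_cons.mp ha with ⟨hx, ha'⟩
      rcases List.pairwise_cons.mp hb with ⟨hy, hb'⟩
      have hyx : y < x := lt_of_le_of_ne (not_lt.mp hnlt) (fun h => hne h.symm)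
      rw [twoPointer, if_neg hne, if_neg hnlt, ih ha hb']
      constructor
      · rintro ⟨z, hz1, hz2⟩; exact ⟨z, hz1, List.mem_cons_of_mem _ hz2⟩
      · rintro ⟨z, hz1, hz2⟩
        rcases List.mem_cons.mp hz2 with rfl | hz2'
        · exfalso
          rcases List.mem_cons.mp hz1 with rfl | hz1'
          · exact hne rfl
          · exact absurd (hx z hz1') (not_le.mpr hyx)
        · exact ⟨z, hz1, hz2'⟩

-- ===== VERDICT (by name: the statement is the Claim_ definition above) =====
theorem check_diff_spec : Claim_equal_check_diff := by
  intro list1 list2 _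
  unfold Spec_check_diff check_diff_alt
  rw [check_diff_eq_any]
  rw [Bool.eq_iff_iff,
      twoPointer_iff _ _ (PySem.List.sorted_pairwise list1 (fun z => z))
                         (PySem.List.sorted_pairwise list2 (fun z => z))]
  simp [PySem.List.mem_sorted, List.any_eq_true, and_comm]
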